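-- pv_equiv track=rewrite | github.com/Manjunath9346/my-python-codes | Data structures2/Nth_Natural_Number.py | findNth
-- ===== SOURCE A (Python) =====
-- def findNth(n):
--     result = 0
--     place = 1
--     while n > 0:
--         result += (n % 9) * place
--         n //= 9
--         place *= 10
--     return result
-- ===== SOURCE B (Python) =====
-- def findNth(n):
--     # Closed-form: the answer reads n's base-9 digits as base-10 digits.
--     # 11 base-9 digit positions cover every 32-bit input (9**11 > 2**31).
--     if n <= 0:
--         return 0
--     return sum(n // 9**i % 9 * 10**i for i in range(11))
-- ===== Notes on version B (the rewrite author's own statement) =====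
-- stated objective: alternative
-- what changed: Replaces A's data-dependent while loop with running result/place accumulators by a loop-free closed-form sum over a fixed 11 digit positions (enough for 32-bit inputs), extracting each base-9 digit independently with n // 9**i % 9 and weighting it by 10**i.
import Mathlib
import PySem

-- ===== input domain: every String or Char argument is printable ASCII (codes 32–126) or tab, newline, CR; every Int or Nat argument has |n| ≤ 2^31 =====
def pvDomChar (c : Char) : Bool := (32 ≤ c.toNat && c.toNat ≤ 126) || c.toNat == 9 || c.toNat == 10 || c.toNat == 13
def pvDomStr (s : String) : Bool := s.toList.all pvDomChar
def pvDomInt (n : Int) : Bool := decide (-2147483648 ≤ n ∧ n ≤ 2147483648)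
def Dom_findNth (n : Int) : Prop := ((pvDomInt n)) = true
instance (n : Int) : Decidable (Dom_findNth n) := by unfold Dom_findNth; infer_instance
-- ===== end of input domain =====

-- B replaces A's data-dependent accumulator loop by a loop-free closed-form sum over a
-- fixed 11 digit positions (9^11 > 2^31 covers the 32-bit domain); objective: alternative.

-- ===== PORT A =====
-- A's while loop: state (n, result, place)
def findNthGo (n result place : Int) : Int :=
  if _h : n > 0 then
    findNthGo (PySem.Int.floordiv n 9) (result + PySem.Int.mod n 9 * place) (place * 10)
  else result
termination_by n.toNat
decreasing_by
  rw [PySem.Int.floordiv_eq_ediv_of_pos (by norm_num : (0:Int) < 9)]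
  omega

def findNth (n : Int) : Int := findNthGo n 0 1

-- ===== PORT B =====
-- Source B: guard, then sum(n // 9**i % 9 * 10**i for i in range(11))
def findNth_alt (n : Int) : Int :=
  if n ≤ 0 then 0
  else ((PySem.List.pyRange 0 11 1).map
          (fun i => PySem.Int.mod (PySem.Int.floordiv n ((9:Int) ^ i.toNat)) 9
                      * (10:Int) ^ i.toNat)).sum

-- ===== PRECONDITION & SPEC =====
def Spec_findNth (n : Int) (out : Int) : Prop := out = findNth_alt n
instance (n : Int) (out : Int) : Decidable (Spec_findNth n out) := by unfold Spec_findNth; infer_instance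

-- ===== CLAIM (what is proved, stated in full; the proofs are below) =====
def Claim_equal_findNth : Prop := ∀ (n : Int), Dom_findNth n → Spec_findNth n (findNth n)

-- ===== LEMMAS AND PROOFS =====

-- proof-only helper: the first k terms of B's digit sum, in plain ediv/emod form
def pvSum (k : Nat) (n : Int) : Int :=
  ((List.range k).map (fun i => n / 9 ^ i % 9 * 10 ^ i)).sum

theorem pvSum_zero_input (k : Nat) : pvSum k 0 = 0 := by
  induction k with
  | zero => rfl
  | succ k ih => unfold pvSum at *; rw [List.range_succ]; simp_all

theorem pvSum_succ (k : Nat) (n : Int) :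
    pvSum (k + 1) n = n % 9 + 10 * pvSum k (n / 9) := by
  have hdd : ∀ i : Nat, n / 9 ^ (i + 1) = n / 9 / 9 ^ i := by
    intro i
    rw [Int.ediv_ediv_of_nonneg (by norm_num : (0:Int) ≤ 9), pow_succ, mul_comm]
  unfold pvSum
  rw [List.range_succ_eq_map]
  simp only [List.map_cons, List.map_map, List.sum_cons, Function.comp_def,
    Nat.succ_eq_add_one, pow_zero, Int.ediv_one, mul_one, pow_succ, ← mul_assoc]
  rw [List.sum_map_mul_right]
  have hdd' : ∀ x : Nat, n / (9 ^ x * 9) = n / 9 / 9 ^ x := by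
    intro x; rw [← pow_succ]; exact hdd x
  simp only [hdd']
  ring

theorem findNthGo_eq_pvSum (k : Nat) : ∀ (n r p : Int), 0 ≤ n → n < 9 ^ k →
    findNthGo n r p = r + p * pvSum k n := by
  induction k with
  | zero =>
    intro n r p h0 hk
    have hk' : n < 1 := by simpa using hk
    have hn0 : n = 0 := by omega
    subst hn0
    rw [findNthGo]
    simp [pvSum]
  | succ k ih =>
    intro n r p h0 hk
    by_cases hn : n > 0
    · rw [findNthGo]
      simp only [hn, dif_pos]
      rw [PySem.Int.floordiv_eq_ediv_of_pos (by norm_num : (0:Int) < 9),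
          PySem.Int.mod_eq_emod_of_pos (by norm_num : (0:Int) < 9)]
      have h9 : (0:Int) < 9 := by norm_num
      have hdiv0 : 0 ≤ n / 9 := Int.ediv_nonneg h0 (by norm_num)
      have hdivk : n / 9 < 9 ^ k := by
        rw [Int.ediv_lt_iff_lt_mul h9, ← pow_succ]
        exact hk
      rw [ih (n / 9) _ _ hdiv0 hdivk, pvSum_succ]
      ring
    · have : n = 0 := by omega
      subst this
      rw [findNthGo]
      simp [pvSum_zero_input]

-- bridge: B's port equals pvSum 11 on positive inputs
theorem alt_eq_pvSum (n : Int) (hn : ¬ n ≤ 0) : findNth_alt n = pvSum 11 n := by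
  unfold findNth_alt
  rw [if_neg hn, PySem.List.pyRange_one]
  unfold pvSum
  simp only [List.map_map, Function.comp_def]
  congr 1
  apply List.map_congr_left
  intro k _
  have ht : ((0:Int) + (k:Int)).toNat = k := by omega
  rw [ht,
      PySem.Int.floordiv_eq_ediv_of_pos (by positivity),
      PySem.Int.mod_eq_emod_of_pos (by norm_num : (0:Int) < 9)]

-- ===== VERDICT (by name: the statement is the Claim_ definition above) =====
theorem findNth_spec : Claim_equal_findNth := by
  intro n hdom
  unfold Spec_findNth findNth
  by_cases hn : n ≤ 0
  · rw [findNthGo]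
    unfold findNth_alt
    simp [hn, not_lt.mpr hn]
  · have h0 : 0 ≤ n := by omega
    have hb : -2147483648 ≤ n ∧ n ≤ 2147483648 := by
      have hd := hdom
      unfold Dom_findNth pvDomInt at hd
      exact of_decide_eq_true hd
    have hbound : n < 9 ^ 11 := by
      calc n ≤ 2147483648 := hb.2
        _ < 9 ^ 11 := by norm_num
    rw [findNthGo_eq_pvSum 11 n 0 1 h0 hbound, alt_eq_pvSum n hn]
    ring
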